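-- pv_equiv track=rewrite | github.com/TobiasWallner/Fiber | embed/Allocator/AllocatorHeaderSizeEncodingStats.py | next_encodable_spacing_1
-- ===== SOURCE A (Python) =====
-- def next_encodable_spacing_1(user_size):
--     result = 0b101010101010101010101010101010
--     bit_flip_poses = [29, 27, 25, 23, 21, 19, 17, 15, 13, 11, 9, 7, 5, 3, 1]
--     for i in range(15):
--         # try to clear the largest pos-bit to make it smaller
--         bit_flip_pos = bit_flip_poses[i]
--         temp = result ^ (1 << bit_flip_pos)
--
--         # if temp got smaller but is still larger than user_size --> take it
--         if(temp > user_size):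
--             result = temp
--     # result is now the smallest number that is larger than than user_size and still representable in the encoding.
--     return result
-- ===== SOURCE B (Python) =====
-- def next_encodable_spacing_1(user_size):
--     # The encodable numbers are exactly value(k) for k in [0, 2**15):
--     # the 15 bits of the rank k spread to the odd bit positions 1,3,...,29.
--     # value is strictly increasing in k, so binary-search the smallest rank
--     # whose value exceeds user_size (capped at the largest encodable value).
--     def value(k):
--         v = 0
--         for i in range(15):
--             v += ((k >> i) & 1) << (2 * i + 1)
--         return v
--
--     top = (1 << 15) - 1
--     if user_size >= value(top):
--         return value(top)
--     lo, hi = 0, top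
--     while lo < hi:
--         mid = (lo + hi) // 2
--         if value(mid) > user_size:
--             hi = mid
--         else:
--             lo = mid + 1
--     return value(lo)
-- ===== Notes on version B (the rewrite author's own statement) =====
-- stated objective: alternative
-- what changed: B views the encodable numbers as a strictly increasing sequence value(k) (rank bits spread to odd positions) and binary-searches the smallest rank whose value exceeds user_size, instead of A's greedy pass that XOR-clears bits out of the maximal constant.
import Mathlib
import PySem

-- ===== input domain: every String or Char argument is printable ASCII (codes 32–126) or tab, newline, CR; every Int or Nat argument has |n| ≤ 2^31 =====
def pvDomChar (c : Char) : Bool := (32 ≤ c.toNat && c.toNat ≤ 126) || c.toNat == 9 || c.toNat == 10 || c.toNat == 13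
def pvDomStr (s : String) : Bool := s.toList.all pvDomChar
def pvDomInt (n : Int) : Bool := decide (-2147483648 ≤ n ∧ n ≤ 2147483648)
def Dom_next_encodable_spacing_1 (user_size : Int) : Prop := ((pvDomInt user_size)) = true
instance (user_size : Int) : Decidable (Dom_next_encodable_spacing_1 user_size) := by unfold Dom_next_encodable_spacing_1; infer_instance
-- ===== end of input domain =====

-- B binary-searches the rank of the answer in the increasing sequence of encodable values
-- (rank bits spread to odd positions), instead of A's greedy XOR-clearing pass; objective: alternative.

-- ===== PORT A =====
-- positions held as Nat since the shift amount of `<<<` is a Nat; `1 << p` is `((1 <<< p : Nat) : Int)` (exact: both nonneg)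
def next_encodable_spacing_1 (user_size : Int) : Int :=
  let bit_flip_poses : List Nat := [29, 27, 25, 23, 21, 19, 17, 15, 13, 11, 9, 7, 5, 3, 1]
  (PySem.List.pyRange 0 15 1).foldl (fun result i =>
    let bit_flip_pos := PySem.List.pyGetD bit_flip_poses i 0
    let temp := PySem.Int.bxor result (((1 <<< bit_flip_pos : Nat) : Int))
    if temp > user_size then temp else result) 715827882

-- ===== PORT B =====
-- value(k): k's 15 bits spread to the odd positions 1,3,...,29; every quantity in Source B's
-- helper stays nonnegative, so Nat arithmetic is exact for Python's >>/&/<< here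
def pvValueB (k : Nat) : Nat :=
  (List.range 15).foldl (fun v i => v + (((k >>> i) &&& 1) <<< (2 * i + 1))) 0

-- the while-loop binary search of Source B (lo, hi nonnegative throughout)
def pvBS (u : Int) (lo hi : Nat) : Nat :=
  if h : lo < hi then
    let mid := (lo + hi) / 2
    if (pvValueB mid : Int) > u then pvBS u lo mid else pvBS u (mid + 1) hi
  else lo
termination_by hi - lo
decreasing_by all_goals omega

def next_encodable_spacing_1_alt (user_size : Int) : Int :=
  let top : Nat := (1 <<< 15) - 1
  if user_size ≥ (pvValueB top : Int) then (pvValueB top : Int)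
  else (pvValueB (pvBS user_size 0 top) : Int)

-- ===== PRECONDITION & SPEC =====
def Spec_next_encodable_spacing_1 (user_size : Int) (out : Int) : Prop := out = next_encodable_spacing_1_alt user_size
instance (user_size : Int) (out : Int) : Decidable (Spec_next_encodable_spacing_1 user_size out) := by unfold Spec_next_encodable_spacing_1; infer_instance

-- ===== CLAIM (what is proved, stated in full; the proofs are below) =====
def Claim_equal_next_encodable_spacing_1 : Prop := ∀ (user_size : Int), Dom_next_encodable_spacing_1 user_size → Spec_next_encodable_spacing_1 user_size (next_encodable_spacing_1 user_size)

-- ===== LEMMAS AND PROOFS =====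

/-- the position list A uses -/
def pvPos : List Nat := [29, 27, 25, 23, 21, 19, 17, 15, 13, 11, 9, 7, 5, 3, 1]

/-- the position list of the n lowest odd positions, descending -/
def pvP : Nat → List Nat
  | 0 => []
  | n + 1 => (2 * n + 1) :: pvP n

/-- sum of the bit values of a position list -/
def pvS (L : List Nat) : Int := (L.map (fun p => ((1 <<< p : Nat) : Int))).sum

/-- A's loop as a fold over the position list itself -/
def pvLoopA (u : Int) (r : Int) (L : List Nat) : Int :=
  L.foldl (fun result p =>
    let temp := PySem.Int.bxor result ((1 <<< p : Nat) : Int)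
    if temp > u then temp else result) r

/-- A's greedy written recursively: smallest subset-sum of the bit values of L exceeding u,
saturating at the full sum -/
def pvMinEnc (u : Int) : List Nat → Int
  | [] => 0
  | p :: L => if pvS L > u then pvMinEnc u L else 2 ^ p + pvMinEnc (u - 2 ^ p) L

/-- the k-th encodable value: bits of k spread to the odd positions (recursive form) -/
def pvPhi (k : Nat) : Nat :=
  if h : k = 0 then 0 else 2 * (k % 2) + 4 * pvPhi (k / 2)
termination_by k
decreasing_by omega

/-- rank of the answer, mirroring pvMinEnc digit by digit -/
def pvK : Nat → Int → Nat
  | 0, _ => 0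
  | n + 1, u => if (pvPhi (2 ^ n - 1) : Int) > u then pvK n u
                else 2 ^ n + pvK n (u - 2 * 4 ^ n)

/-- k is the smallest rank whose value exceeds u -/
def pvIsMin (u : Int) (k : Nat) : Prop :=
  u < (pvPhi k : Int) ∧ ∀ j < k, (pvPhi j : Int) ≤ u

/-- well-shaped position list: strictly dominating head with small suffix sum -/
def pvGood : List Nat → Prop
  | [] => True
  | p :: L => (∀ q ∈ L, q < p) ∧ pvS L < 2 ^ p ∧ pvGood L

lemma pv_shift_eq_pow (p : Nat) : ((1 <<< p : Nat) : Int) = 2 ^ p := by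
  rw [Nat.one_shiftLeft]; push_cast; ring

lemma pvS_nonneg (L : List Nat) : 0 ≤ pvS L := by
  induction L with
  | nil => simp [pvS]
  | cons p L ih =>
    simp only [pvS, List.map_cons, List.sum_cons] at *
    have h : (0:Int) ≤ ((1 <<< p : Nat) : Int) := Int.natCast_nonneg _
    omega

lemma pv_nat_xor_clear (a c p : Nat) (hc : c < 2 ^ p) :
    (2 ^ (p + 1) * a + 2 ^ p + c) ^^^ 2 ^ p = 2 ^ (p + 1) * a + c := by
  apply Nat.eq_of_testBit_eq
  intro j
  have hpow : (2:Nat) ^ (p+1) = 2 ^ p + 2 ^ p := by ring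
  have hb : 2 ^ p + c < 2 ^ (p + 1) := by omega
  have hc' : c < 2 ^ (p + 1) := by omega
  rw [Nat.testBit_xor, Nat.testBit_two_pow]
  rw [show 2 ^ (p + 1) * a + 2 ^ p + c = 2 ^ (p + 1) * a + (2 ^ p + c) by ring]
  rw [Nat.testBit_two_pow_mul_add a hb j, Nat.testBit_two_pow_mul_add a hc' j]
  by_cases hj : j < p + 1
  · simp only [hj, if_pos]
    by_cases hjp : j = p
    · subst hjp
      have h1 : (2 ^ j + c).testBit j = true := by
        rw [show 2 ^ j + c = 2 ^ j * 1 + c by ring, Nat.testBit_two_pow_mul_add 1 hc j]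
        simp
      rw [h1, Nat.testBit_lt_two_pow hc]
      simp
    · have h1 : (2 ^ p + c).testBit j = c.testBit j := by
        rw [show 2 ^ p + c = 2 ^ p * 1 + c by ring, Nat.testBit_two_pow_mul_add 1 hc j]
        have hjlt : j < p := by omega
        simp [hjlt]
      rw [h1]
      simp [Ne.symm hjp]
  · simp only [hj, if_false]
    have hne : p ≠ j := by omega
    simp [hne]

/-- clearing a set bit by XOR is subtraction -/
lemma pv_bxor_clear (acc c : Int) (p : Nat) (hd : (2 : Int) ^ (p + 1) ∣ acc)
    (h0 : 0 ≤ acc) (hc0 : 0 ≤ c) (hc : c < 2 ^ p) :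
    PySem.Int.bxor (acc + 2 ^ p + c) ((2 : Int) ^ p) = acc + c := by
  obtain ⟨a, ha⟩ := hd
  have ha0 : 0 ≤ a := by
    by_contra hcon
    have h : a < 0 := by omega
    have h2 : (0:Int) < 2 ^ (p+1) := by positivity
    have : acc < 0 := ha ▸ mul_neg_of_pos_of_neg h2 h
    omega
  obtain ⟨an, rfl⟩ := Int.eq_ofNat_of_zero_le ha0
  obtain ⟨cn, rfl⟩ := Int.eq_ofNat_of_zero_le hc0
  have hcn : cn < 2 ^ p := by exact_mod_cast hc
  rw [ha]
  rw [show ((2:Int) ^ (p+1) * an + 2 ^ p + cn) = ((2 ^ (p+1) * an + 2 ^ p + cn : Nat) : Int) by push_cast; ring,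
      show ((2:Int) ^ p) = ((2 ^ p : Nat) : Int) by push_cast; ring,
      PySem.Int.bxor_natCast, pv_nat_xor_clear an cn p hcn]
  push_cast; ring

/-- A's loop, clearing down from acc + S L, equals acc plus the recursive greedy pvMinEnc -/
lemma pv_loopA_minEnc (u : Int) : ∀ L : List Nat, pvGood L → ∀ acc : Int, 0 ≤ acc →
    (∀ p ∈ L, (2 : Int) ^ (p + 1) ∣ acc) →
    pvLoopA u (acc + pvS L) L = acc + pvMinEnc (u - acc) L := by
  intro L
  induction L with
  | nil => intro _ acc _ _; simp [pvLoopA, pvMinEnc, pvS]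
  | cons p L ih =>
    rintro ⟨hlt, hS, hG⟩ acc hacc hdiv
    have hSn := pvS_nonneg L
    have hSsplit : pvS (p :: L) = 2 ^ p + pvS L := by
      simp only [pvS, List.map_cons, List.sum_cons]
      rw [pv_shift_eq_pow]
    have hxor : PySem.Int.bxor (acc + pvS (p :: L)) ((1 <<< p : Nat) : Int) = acc + pvS L := by
      rw [pv_shift_eq_pow, hSsplit, show acc + (2 ^ p + pvS L) = acc + 2 ^ p + pvS L by ring]
      exact pv_bxor_clear acc (pvS L) p (hdiv p (by simp)) hacc hSn hS
    simp only [pvLoopA, pvMinEnc, List.foldl_cons] at *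
    rw [hxor]
    by_cases hcmp : acc + pvS L > u
    · rw [if_pos hcmp, if_pos (by omega : pvS L > u - acc)]
      exact ih hG acc hacc (fun q hq => hdiv q (by simp [hq]))
    · rw [if_neg hcmp, if_neg (by omega : ¬ pvS L > u - acc), hSsplit,
          show acc + (2 ^ p + pvS L) = (acc + 2 ^ p) + pvS L by ring]
      have h2p : (0:Int) < 2 ^ p := by positivity
      rw [ih hG (acc + 2 ^ p) (by omega) (by
        intro q hq
        have hqp : q < p := hlt q hq
        exact dvd_add (dvd_trans (pow_dvd_pow 2 (by omega)) (hdiv p (by simp)))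
          (pow_dvd_pow 2 (by omega)))]
      rw [show u - (acc + 2 ^ p) = u - acc - 2 ^ p by ring]
      ring

lemma pvPhi_eq (k : Nat) : pvPhi k = if k = 0 then 0 else 2 * (k % 2) + 4 * pvPhi (k / 2) := by
  rw [pvPhi]; simp

lemma pvPhi_zero : pvPhi 0 = 0 := by rw [pvPhi_eq]; simp

lemma pvPhi_two_mul (m : Nat) : pvPhi (2 * m) = 4 * pvPhi m := by
  rcases Nat.eq_zero_or_pos m with h | h
  · simp [h, pvPhi_zero]
  · rw [pvPhi_eq]
    have h0 : 2 * m ≠ 0 := by omega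
    have h1 : 2 * m % 2 = 0 := by omega
    have h2 : 2 * m / 2 = m := by omega
    simp [h0, h1, h2]

lemma pvPhi_two_mul_add_one (m : Nat) : pvPhi (2 * m + 1) = 2 + 4 * pvPhi m := by
  rw [pvPhi_eq]
  have h1 : (2 * m + 1) % 2 = 1 := by omega
  have h2 : (2 * m + 1) / 2 = m := by omega
  simp [h1, h2]

lemma pvPhi_lt_succ (k : Nat) : pvPhi k < pvPhi (k + 1) := by
  induction k using Nat.strong_induction_on with
  | _ k ih =>
    rcases Nat.even_or_odd k with ⟨m, hm⟩ | ⟨m, hm⟩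
    · have hk : k = 2 * m := by omega
      subst hk
      rw [pvPhi_two_mul, pvPhi_two_mul_add_one]
      omega
    · have hk : k = 2 * m + 1 := by omega
      subst hk
      have h2 : 2 * m + 1 + 1 = 2 * (m + 1) := by ring
      rw [h2, pvPhi_two_mul, pvPhi_two_mul_add_one]
      have := ih m (by omega)
      omega

lemma pvPhi_mono : StrictMono pvPhi := strictMono_nat_of_lt_succ pvPhi_lt_succ

lemma pvPhi_msb (n : Nat) : ∀ k, k < 2 ^ n → pvPhi (2 ^ n + k) = 2 * 4 ^ n + pvPhi k := by
  induction n with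
  | zero =>
    intro k hk
    interval_cases k
    rw [show 2 ^ 0 + 0 = 2 * 0 + 1 by norm_num, pvPhi_two_mul_add_one, pvPhi_zero]
    norm_num
  | succ n ih =>
    intro k hk
    have hp : (2:Nat) ^ (n + 1) = 2 * 2 ^ n := by ring
    rcases Nat.even_or_odd k with ⟨m, hm⟩ | ⟨m, hm⟩
    · have hk2 : k = 2 * m := by omega
      subst hk2
      have hm2 : m < 2 ^ n := by omega
      rw [show 2 ^ (n+1) + 2 * m = 2 * (2 ^ n + m) by ring, pvPhi_two_mul, ih _ hm2,
          pvPhi_two_mul]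
      ring
    · have hk2 : k = 2 * m + 1 := by omega
      subst hk2
      have hm2 : m < 2 ^ n := by omega
      rw [show 2 ^ (n+1) + (2 * m + 1) = 2 * (2 ^ n + m) + 1 by ring,
          pvPhi_two_mul_add_one, ih _ hm2, pvPhi_two_mul_add_one]
      ring

lemma pvPhi_ones_lt (n : Nat) : pvPhi (2 ^ n - 1) < 4 ^ n := by
  induction n with
  | zero => simp [pvPhi_zero]
  | succ n ih =>
    have h1 : (2:Nat) ^ (n+1) - 1 = 2 ^ n + (2 ^ n - 1) := by
      have := Nat.one_le_two_pow (n := n)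
      have hp : (2:Nat) ^ (n + 1) = 2 * 2 ^ n := by ring
      omega
    rw [h1, pvPhi_msb n _ (by have := Nat.one_le_two_pow (n := n); omega)]
    have h4 : (4:Nat) ^ (n+1) = 4 * 4 ^ n := by ring
    omega

lemma pv_nat_pow_odd (n : Nat) : (2:Nat) ^ (2 * n + 1) = 2 * 4 ^ n := by
  rw [pow_succ, pow_mul]; norm_num; ring

lemma pv_int_pow_odd (n : Nat) : (2:Int) ^ (2 * n + 1) = 2 * 4 ^ n := by
  rw [pow_succ, pow_mul]; norm_num; ring

lemma pvS_P (n : Nat) : pvS (pvP n) = (pvPhi (2 ^ n - 1) : Int) := by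
  induction n with
  | zero => simp [pvP, pvS, pvPhi_zero]
  | succ n ih =>
    have h1 : (2:Nat) ^ (n+1) - 1 = 2 ^ n + (2 ^ n - 1) := by
      have := Nat.one_le_two_pow (n := n)
      have hp : (2:Nat) ^ (n + 1) = 2 * 2 ^ n := by ring
      omega
    have hlt : (2:Nat) ^ n - 1 < 2 ^ n := by
      have := Nat.one_le_two_pow (n := n); omega
    simp only [pvP, pvS, List.map_cons, List.sum_cons]
    rw [show ((pvP n).map (fun p => ((1 <<< p : Nat) : Int))).sum = pvS (pvP n) from rfl,
        ih, pv_shift_eq_pow, h1, pvPhi_msb n _ hlt]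
    rw [pv_int_pow_odd]
    push_cast
    ring

lemma pvP_mem (n : Nat) : ∀ q ∈ pvP n, q < 2 * n := by
  induction n with
  | zero => simp [pvP]
  | succ n ih =>
    intro q hq
    simp only [pvP, List.mem_cons] at hq
    rcases hq with rfl | hq
    · omega
    · have := ih q hq; omega

lemma pv_good_P (n : Nat) : pvGood (pvP n) := by
  induction n with
  | zero => simp [pvP, pvGood]
  | succ n ih =>
    refine ⟨fun q hq => by have := pvP_mem n q hq; omega, ?_, ih⟩
    rw [pvS_P, pv_int_pow_odd]
    have h1 : pvPhi (2 ^ n - 1) < 4 ^ n := pvPhi_ones_lt n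
    have h2 : ((pvPhi (2 ^ n - 1) : Nat) : Int) < ((4 ^ n : Nat) : Int) := by exact_mod_cast h1
    have h3 : ((4 ^ n : Nat) : Int) = (4:Int) ^ n := by push_cast; ring
    have h4 : (0:Int) < 4 ^ n := by positivity
    omega

lemma pvK_lt (n : Nat) (u : Int) : pvK n u < 2 ^ n := by
  induction n generalizing u with
  | zero => simp [pvK]
  | succ n ih =>
    simp only [pvK]
    have h1 := ih u
    have h2 := ih (u - 2 * 4 ^ n)
    have hp : (2:Nat) ^ (n + 1) = 2 * 2 ^ n := by ring
    split_ifs <;> omega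

lemma pv_minEnc_phi (n : Nat) : ∀ u : Int, pvMinEnc u (pvP n) = (pvPhi (pvK n u) : Int) := by
  induction n with
  | zero => intro u; simp [pvP, pvMinEnc, pvK, pvPhi_zero]
  | succ n ih =>
    intro u
    simp only [pvP, pvMinEnc, pvK]
    rw [pvS_P]
    split_ifs with h
    · exact ih u
    · rw [pv_int_pow_odd, ih (u - 2 * 4 ^ n),
          pvPhi_msb n _ (pvK_lt n (u - 2 * 4 ^ n))]
      push_cast
      ring

lemma pvK_isMin (n : Nat) : ∀ u : Int, u < (pvPhi (2 ^ n - 1) : Int) → pvIsMin u (pvK n u) := by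
  induction n with
  | zero =>
    intro u hu
    simp only [pow_zero, Nat.sub_self, pvPhi_zero, Nat.cast_zero] at hu
    constructor
    · simpa [pvK, pvPhi_zero] using hu
    · intro j hj
      simp [pvK] at hj
  | succ n ih =>
    intro u hu
    have h1 : (2:Nat) ^ (n+1) - 1 = 2 ^ n + (2 ^ n - 1) := by
      have := Nat.one_le_two_pow (n := n)
      have hp : (2:Nat) ^ (n + 1) = 2 * 2 ^ n := by ring
      omega
    have hlt : (2:Nat) ^ n - 1 < 2 ^ n := by
      have := Nat.one_le_two_pow (n := n); omega
    rw [h1, pvPhi_msb n _ hlt] at hu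
    simp only [pvK]
    split_ifs with hc
    · exact ih u hc
    · push Not at hc
      have hu' : u - 2 * 4 ^ n < (pvPhi (2 ^ n - 1) : Int) := by push_cast at hu ⊢; omega
      obtain ⟨h1', h2'⟩ := ih (u - 2 * 4 ^ n) hu'
      constructor
      · rw [pvPhi_msb n _ (pvK_lt n (u - 2 * 4 ^ n))]
        push_cast at h1' ⊢
        omega
      · intro j hj
        by_cases hjn : j < 2 ^ n
        · have hmono : pvPhi j ≤ pvPhi (2 ^ n - 1) := pvPhi_mono.monotone (by omega)
          calc (pvPhi j : Int) ≤ (pvPhi (2 ^ n - 1) : Int) := by exact_mod_cast hmono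
            _ ≤ u := hc
        · have hj' : j - 2 ^ n < pvK n (u - 2 * 4 ^ n) := by omega
          have hjlt : j - 2 ^ n < 2 ^ n := by have := pvK_lt n (u - 2 * 4 ^ n); omega
          have : j = 2 ^ n + (j - 2 ^ n) := by omega
          rw [this, pvPhi_msb n _ hjlt]
          have := h2' _ hj'
          push_cast at this ⊢
          omega

lemma pvIsMin_unique (u : Int) (a b : Nat) (ha : pvIsMin u a) (hb : pvIsMin u b) : a = b := by
  rcases lt_trichotomy a b with h | h | h
  · have := hb.2 a h; have := ha.1; omega
  · exact h
  · have := ha.2 b h; have := hb.1; omega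

lemma pv_minEnc_sat (u : Int) : ∀ L : List Nat, pvS L ≤ u → pvMinEnc u L = pvS L := by
  intro L
  induction L generalizing u with
  | nil => intro _; simp [pvMinEnc, pvS]
  | cons p L ih =>
    intro hu
    have hSsplit : pvS (p :: L) = 2 ^ p + pvS L := by
      simp only [pvS, List.map_cons, List.sum_cons]; rw [pv_shift_eq_pow]
    have h2p : (0:Int) < 2 ^ p := by positivity
    rw [hSsplit] at hu
    simp only [pvMinEnc]
    rw [if_neg (by omega : ¬ pvS L > u), ih (u - 2 ^ p) (by omega), hSsplit]

lemma pvValueB_fold (k : Nat) : ∀ n : Nat,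
    (List.range n).foldl (fun v i => v + (((k >>> i) &&& 1) <<< (2 * i + 1))) 0
      = pvPhi (k % 2 ^ n) := by
  intro n
  induction n with
  | zero => simp [Nat.mod_one, pvPhi_zero]
  | succ n ih =>
    rw [List.range_succ, List.foldl_append, ih]
    simp only [List.foldl_cons, List.foldl_nil]
    have hbit : (k >>> n) &&& 1 = k / 2 ^ n % 2 := by
      rw [Nat.shiftRight_eq_div_pow, Nat.and_one_is_mod]
    have hmod : k % 2 ^ (n + 1) = k % 2 ^ n + 2 ^ n * (k / 2 ^ n % 2) := by
      rw [show (2:Nat) ^ (n+1) = 2 ^ n * 2 by ring, Nat.mod_mul]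
    have hr : k % 2 ^ n < 2 ^ n := Nat.mod_lt _ (by positivity)
    rw [hbit, Nat.shiftLeft_eq, hmod]
    rcases Nat.mod_two_eq_zero_or_one (k / 2 ^ n) with h | h
    · simp [h]
    · rw [h, Nat.mul_one, Nat.add_comm (k % 2 ^ n) (2 ^ n), pvPhi_msb n _ hr,
          pv_nat_pow_odd]
      ring

lemma pvValueB_phi (k : Nat) (h : k < 32768) : pvValueB k = pvPhi k := by
  rw [pvValueB, pvValueB_fold k 15, Nat.mod_eq_of_lt (by omega : k < 2 ^ 15)]

lemma pvBS_spec (u : Int) (d : Nat) : ∀ lo hi : Nat, hi - lo ≤ d → lo ≤ hi → hi < 32768 →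
    u < (pvPhi hi : Int) → (∀ j < lo, (pvPhi j : Int) ≤ u) →
    pvBS u lo hi ≤ hi ∧ pvIsMin u (pvBS u lo hi) := by
  induction d with
  | zero =>
    intro lo hi hd hle _ hhi hlo
    have : lo = hi := by omega
    subst this
    rw [pvBS, dif_neg (by omega : ¬ lo < lo)]
    exact ⟨le_refl _, hhi, hlo⟩
  | succ d ih =>
    intro lo hi hd hle hb hhi hlo
    rw [pvBS]
    by_cases h : lo < hi
    · rw [dif_pos h]
      have hmid1 : lo ≤ (lo + hi) / 2 := by omega
      have hmid2 : (lo + hi) / 2 < hi := by omega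
      have hv : pvValueB ((lo + hi) / 2) = pvPhi ((lo + hi) / 2) :=
        pvValueB_phi _ (by omega)
      by_cases hc : (pvValueB ((lo + hi) / 2) : Int) > u
      · rw [if_pos hc]
        rw [hv] at hc
        have := ih lo ((lo + hi) / 2) (by omega) hmid1 (by omega) hc hlo
        exact ⟨by omega, this.2⟩
      · rw [if_neg hc]
        rw [hv] at hc
        push Not at hc
        refine ih ((lo + hi) / 2 + 1) hi (by omega) (by omega) hb hhi ?_
        intro j hj
        by_cases hjl : j < lo
        · exact hlo j hjl
        · calc (pvPhi j : Int) ≤ (pvPhi ((lo + hi) / 2) : Int) := by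
                exact_mod_cast pvPhi_mono.monotone (by omega)
            _ ≤ u := hc
    · rw [dif_neg h]
      have : lo = hi := by omega
      subst this
      exact ⟨le_refl _, hhi, hlo⟩

lemma pv_portA_eq (u : Int) : next_encodable_spacing_1 u = pvLoopA u 715827882 pvPos := rfl

lemma pvPos_eq_P : pvPos = pvP 15 := rfl

lemma pv_S_pos : pvS (pvP 15) = 715827882 := by decide

lemma pv_valueB_top : pvValueB 32767 = 715827882 := by decide

/-- A equals the recursive greedy on the full position list -/
lemma pv_A_minEnc (u : Int) : next_encodable_spacing_1 u = pvMinEnc u (pvP 15) := by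
  rw [pv_portA_eq, pvPos_eq_P, show (715827882 : Int) = 0 + pvS (pvP 15) by rw [pv_S_pos]; ring]
  have h := pv_loopA_minEnc u (pvP 15) (pv_good_P 15) 0 le_rfl
    (by intro p _; exact Dvd.intro 0 (by ring))
  simpa using h

-- ===== VERDICT (by name: the statement is the Claim_ definition above) =====
theorem next_encodable_spacing_1_spec : Claim_equal_next_encodable_spacing_1 := by
  intro u _
  unfold Spec_next_encodable_spacing_1 next_encodable_spacing_1_alt
  have htop : ((1 <<< 15 : Nat) - 1 : Nat) = 32767 := by decide
  rw [pv_A_minEnc u]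
  simp only [htop]
  by_cases hcase : u ≥ (pvValueB 32767 : Int)
  · rw [if_pos hcase, pv_minEnc_sat u (pvP 15)
        (by rw [pv_S_pos]; rw [pv_valueB_top] at hcase; exact_mod_cast hcase),
        pv_S_pos, pv_valueB_top]
    norm_num
  · rw [if_neg hcase]
    push Not at hcase
    have hphi_top : pvPhi ((2:Nat) ^ 15 - 1) = pvValueB 32767 := by
      rw [pvValueB_phi 32767 (by norm_num)]; norm_num
    have hu : u < (pvPhi ((2:Nat) ^ 15 - 1) : Int) := by rw [hphi_top]; exact hcase
    have hA : pvMinEnc u (pvP 15) = (pvPhi (pvK 15 u) : Int) := pv_minEnc_phi 15 u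
    have hAmin : pvIsMin u (pvK 15 u) := pvK_isMin 15 u hu
    have hBspec := pvBS_spec u 32767 0 32767 (by norm_num) (by norm_num) (by norm_num)
      (by rw [show pvPhi 32767 = pvValueB 32767 from by rw [pvValueB_phi 32767 (by norm_num)]]; exact hcase)
      (by intro j hj; omega)
    have hkeq : pvK 15 u = pvBS u 0 32767 := pvIsMin_unique u _ _ hAmin hBspec.2
    rw [hA, hkeq, pvValueB_phi (pvBS u 0 32767) (by omega)]
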